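-- pv_equiv track=rewrite | github.com/AdityaVetukuri/Data-Mining-Personal-Projects | Sentiment Analysis - Movie Reviews/src/executable.py | validation_data
-- ===== SOURCE A (Python) =====
-- def validation_data(train_format_data,train_data,k_cross_valid):
-- 	valid_data=[]
-- 	valid_format_data=[]
-- 	train_data_1=[]
-- 	train_format_data_1=[]
-- 	leng= len(train_data)
-- 	leng_per  = int(leng/k_cross_valid)
-- 	for i in range(0,k_cross_valid):
-- 		j=i*leng_per
-- 		valid_data.append(train_data[j:(j+leng_per)])
-- 		valid_format_data.append(train_format_data[j:(j+leng_per)])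
-- 		train_data_1.append(train_data[:j]+train_data[(j+leng_per):])
-- 		train_format_data_1.append(train_format_data[:j]+train_format_data[(j+leng_per):])
--
-- 	return valid_format_data,train_format_data_1,valid_data,train_data_1
-- ===== SOURCE B (Python) =====
-- def validation_data(train_format_data, train_data, k_cross_valid):
--     k = k_cross_valid
--     leng_per = int(len(train_data) / k)
--     chunks_format = [train_format_data[m * leng_per:(m + 1) * leng_per] for m in range(k)]
--     chunks_data = [train_data[m * leng_per:(m + 1) * leng_per] for m in range(k)]
--     tail_format = train_format_data[k * leng_per:]
--     tail_data = train_data[k * leng_per:]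
--
--     def trains(chunks, tail):
--         # pre[i] = everything before chunk i; suf[i] = everything from chunk i on, plus the tail
--         pre = [[]]
--         for c in chunks:
--             pre.append(pre[-1] + c)
--         suf = [tail]
--         for c in reversed(chunks):
--             suf.append(c + suf[-1])
--         suf.reverse()
--         return [pre[i] + suf[i + 1] for i in range(len(chunks))]
--
--     return chunks_format, trains(chunks_format, tail_format), chunks_data, trains(chunks_data, tail_data)
-- ===== Notes on version B (the rewrite author's own statement) =====
-- stated objective: alternative
-- what changed: B precomputes the k validation chunks and the leftover tail once, then assembles each fold's training set by concatenating all chunks except the i-th plus the tail, instead of re-slicing the full list from both ends on every fold.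
import Mathlib
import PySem

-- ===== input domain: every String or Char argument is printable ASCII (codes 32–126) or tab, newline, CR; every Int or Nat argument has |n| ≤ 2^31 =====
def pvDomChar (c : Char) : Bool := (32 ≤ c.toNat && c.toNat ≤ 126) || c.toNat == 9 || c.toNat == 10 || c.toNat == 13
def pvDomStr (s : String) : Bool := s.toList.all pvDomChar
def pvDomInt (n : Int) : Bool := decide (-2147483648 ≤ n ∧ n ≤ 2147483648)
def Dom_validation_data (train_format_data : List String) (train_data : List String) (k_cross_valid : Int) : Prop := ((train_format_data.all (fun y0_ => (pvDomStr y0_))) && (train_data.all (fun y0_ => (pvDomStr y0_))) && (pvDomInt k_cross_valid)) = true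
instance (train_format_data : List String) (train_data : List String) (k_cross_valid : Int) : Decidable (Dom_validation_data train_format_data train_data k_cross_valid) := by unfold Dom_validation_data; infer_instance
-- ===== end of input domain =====

-- B builds the k validation chunks and the leftover tail once and assembles each training set
-- from that chunk table (all chunks except the i-th, then the tail) instead of re-slicing the
-- full lists from both ends on every fold; same cost, different decomposition.

-- ===== PORT A =====
-- Literal transliteration of A: one loop over range(0, k) appending four slices per fold.
-- int(leng/k_cross_valid): for the k > 0 iterations that matter this equals floor division;
-- for k < 0 the loop body never runs, so the value is irrelevant.
def validation_data (train_format_data : List String) (train_data : List String) (k_cross_valid : Int) : List (List String) × List (List String) × List (List String) × List (List String) :=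
  let leng : Int := train_data.length
  let leng_per : Int := PySem.Int.floordiv leng k_cross_valid
  let st := (PySem.List.pyRange 0 k_cross_valid 1).foldl
    (fun (acc : List (List String) × List (List String) × List (List String) × List (List String)) i =>
      let j := i * leng_per
      (acc.1 ++ [PySem.List.slice train_data (some j) (some (j + leng_per))],
       acc.2.1 ++ [PySem.List.slice train_format_data (some j) (some (j + leng_per))],
       acc.2.2.1 ++ [PySem.List.slice train_data none (some j) ++ PySem.List.slice train_data (some (j + leng_per)) none],
       acc.2.2.2 ++ [PySem.List.slice train_format_data none (some j) ++ PySem.List.slice train_format_data (some (j + leng_per)) none]))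
    ([], [], [], [])
  -- st = (valid_data, valid_format_data, train_data_1, train_format_data_1)
  (st.2.1, st.2.2.2, st.1, st.2.2.1)

-- ===== PORT B =====
-- chunk table: [data[m*p:(m+1)*p] for m in range(k)]
def vdChunks (data : List String) (p : Int) (k : Int) : List (List String) :=
  (PySem.List.pyRange 0 k 1).map (fun m => PySem.List.slice data (some (m * p)) (some ((m + 1) * p)))

-- the prefix loop: pre = [[]]; for c in chunks: pre.append(pre[-1] + c)
def vdPre (acc : List String) : List (List String) → List (List String)
  | [] => [acc]
  | c :: rest => acc :: vdPre (acc ++ c) rest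

-- the suffix loop (built over reversed(chunks), then reversed = right-to-left recursion)
def vdSuf (tail : List String) : List (List String) → List (List String)
  | [] => [tail]
  | c :: rest =>
    let s := vdSuf tail rest
    (c ++ s.headD []) :: s

-- [pre[i] + suf[i+1] for i in range(len(chunks))]
def vdTrains (chunks : List (List String)) (tail : List String) : List (List String) :=
  let pre := vdPre [] chunks
  let suf := vdSuf tail chunks
  (List.range chunks.length).map (fun i => pre.getD i [] ++ suf.getD (i + 1) [])

def validation_data_alt (train_format_data : List String) (train_data : List String) (k_cross_valid : Int) : List (List String) × List (List String) × List (List String) × List (List String) :=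
  let k := k_cross_valid
  let leng_per : Int := PySem.Int.floordiv (train_data.length : Int) k
  let chunks_format := vdChunks train_format_data leng_per k
  let chunks_data := vdChunks train_data leng_per k
  let tail_format := PySem.List.slice train_format_data (some (k * leng_per)) none
  let tail_data := PySem.List.slice train_data (some (k * leng_per)) none
  (chunks_format, vdTrains chunks_format tail_format, chunks_data, vdTrains chunks_data tail_data)

-- ===== PRECONDITION & SPEC =====
-- Pre_ excludes only k_cross_valid = 0, where A (and B) raise ZeroDivisionError.
def Pre_validation_data (train_format_data : List String) (train_data : List String) (k_cross_valid : Int) : Prop := k_cross_valid ≠ 0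
instance (train_format_data : List String) (train_data : List String) (k_cross_valid : Int) : Decidable (Pre_validation_data train_format_data train_data k_cross_valid) := by unfold Pre_validation_data; infer_instance

def pvWitness_validation_data : List String × List String × Int := (["a", "b", "c", "d", "e"], ["p", "q", "r", "s", "t"], 2)

def Spec_validation_data (train_format_data : List String) (train_data : List String) (k_cross_valid : Int) (out : List (List String) × List (List String) × List (List String) × List (List String)) : Prop := out = validation_data_alt train_format_data train_data k_cross_valid
instance (train_format_data : List String) (train_data : List String) (k_cross_valid : Int) (out : List (List String) × List (List String) × List (List String) × List (List String)) : Decidable (Spec_validation_data train_format_data train_data k_cross_valid out) := by unfold Spec_validation_data; infer_instance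

-- ===== CLAIM (what is proved, stated in full; the proofs are below) =====
def Claim_equal_validation_data : Prop := ∀ (train_format_data : List String) (train_data : List String) (k_cross_valid : Int), Dom_validation_data train_format_data train_data k_cross_valid → Pre_validation_data train_format_data train_data k_cross_valid → Spec_validation_data train_format_data train_data k_cross_valid (validation_data train_format_data train_data k_cross_valid)

-- ===== LEMMAS AND PROOFS =====

-- A's foldl that appends one element to each of four lists per step is the quadruple of maps.
theorem vd_foldl_four {α : Type} (f1 f2 f3 f4 : α → List String)
    (l : List α) (a1 a2 a3 a4 : List (List String)) :
    l.foldl (fun (acc : List (List String) × List (List String) × List (List String) × List (List String)) i =>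
      (acc.1 ++ [f1 i], acc.2.1 ++ [f2 i], acc.2.2.1 ++ [f3 i], acc.2.2.2 ++ [f4 i]))
      (a1, a2, a3, a4)
    = (a1 ++ l.map f1, a2 ++ l.map f2, a3 ++ l.map f3, a4 ++ l.map f4) := by
  induction l generalizing a1 a2 a3 a4 with
  | nil => simp
  | cons x xs ih => simp [List.foldl_cons, ih]

-- flatten of the first i chunks is the first i*P elements.
theorem vd_chunks_prefix (data : List String) (P : Nat) :
    ∀ (K i : Nat), i ≤ K →
    ((((List.range K).map (fun m => (data.drop (m * P)).take P)).take i)).flatten = data.take (i * P) := by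
  intro K i hiK
  rw [← List.map_take, List.take_range, Nat.min_eq_left hiK]
  induction i with
  | zero => simp
  | succ n ih =>
    rw [List.range_succ, List.map_append, List.flatten_append, ih (Nat.le_of_succ_le hiK)]
    simp [Nat.succ_mul, List.take_add]

-- flatten of the chunks after index j, plus the tail, is everything from j*P on.
theorem vd_chunks_suffix (data : List String) (P : Nat) (K : Nat) :
    ∀ (j : Nat), j ≤ K →
    ((((List.range K).map (fun m => (data.drop (m * P)).take P)).drop j)).flatten ++ data.drop (K * P)
      = data.drop (j * P) := by
  intro j hj
  induction hn : K - j generalizing j with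
  | zero =>
    have : j = K := by omega
    subst this
    rw [List.drop_of_length_le (by simp)]
    simp
  | succ n ih =>
    have hjK : j < K := by omega
    have hlen : j < ((List.range K).map (fun m => (data.drop (m * P)).take P)).length := by
      simpa using hjK
    rw [List.drop_eq_getElem_cons hlen]
    simp only [List.getElem_map, List.getElem_range, List.flatten_cons, List.append_assoc]
    rw [ih (j + 1) hjK (by omega)]
    have : data.drop ((j + 1) * P) = (data.drop (j * P)).drop P := by
      rw [List.drop_drop]; ring_nf
    rw [this, List.take_append_drop]

-- the prefix table holds the flattened chunk prefixes.
theorem vdPre_getD (chunks : List (List String)) :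
    ∀ (acc : List String) (n : Nat), n ≤ chunks.length →
    (vdPre acc chunks).getD n [] = acc ++ (chunks.take n).flatten := by
  induction chunks with
  | nil =>
    intro acc n hn
    have : n = 0 := by simpa using hn
    subst this; simp [vdPre]
  | cons c rest ih =>
    intro acc n hn
    cases n with
    | zero => simp [vdPre]
    | succ m =>
      simp only [vdPre, List.getD_cons_succ, List.take_succ_cons, List.flatten_cons]
      rw [ih (acc ++ c) m (by simpa using hn)]
      simp

-- the suffix table holds the flattened chunk suffixes followed by the tail.
theorem vdSuf_getD (tail : List String) (chunks : List (List String)) :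
    ∀ (j : Nat), j ≤ chunks.length →
    (vdSuf tail chunks).getD j [] = (chunks.drop j).flatten ++ tail := by
  induction chunks with
  | nil =>
    intro j hj
    have : j = 0 := by simpa using hj
    subst this; simp [vdSuf]
  | cons c rest ih =>
    intro j hj
    cases j with
    | zero =>
      simp only [vdSuf, List.getD_cons_zero, List.drop_zero, List.flatten_cons, List.append_assoc]
      congr 1
      have h0 := ih 0 (Nat.zero_le _)
      cases rest with
      | nil => simp [vdSuf]
      | cons d ds => simpa [vdSuf, List.headD] using h0
    | succ m =>
      simp only [vdSuf, List.getD_cons_succ, List.drop_succ_cons]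
      exact ih m (by simpa using hj)

theorem vdChunks_eq (data : List String) (P K : Nat) :
    vdChunks data (P : Int) (K : Int) = (List.range K).map (fun m => (data.drop (m * P)).take P) := by
  unfold vdChunks
  rw [PySem.List.pyRange_zero_nat, List.map_map]
  apply List.map_congr_left
  intro m _
  simp only [Function.comp_apply]
  have h1 : ((m : Int) * (P : Int)) = ((m * P : Nat) : Int) := by push_cast; ring
  have h2 : (((m : Int) + 1) * (P : Int)) = ((m * P : Nat) : Int) + ((P : Nat) : Int) := by push_cast; ring
  rw [h1, h2, PySem.List.slice_natCast_add]

-- the main per-side identity: for one data list, A's fold components equal B's table-based lists.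
theorem vd_side (data : List String) (P K : Nat) :
    ((PySem.List.pyRange 0 (K : Int) 1).map
        (fun i => PySem.List.slice data none (some (i * (P : Int))) ++
                  PySem.List.slice data (some (i * (P : Int) + (P : Int))) none))
    = vdTrains (vdChunks data (P : Int) (K : Int)) (PySem.List.slice data (some ((K : Int) * (P : Int))) none) := by
  unfold vdTrains
  rw [vdChunks_eq, PySem.List.pyRange_zero_nat, List.map_map]
  simp only [List.length_map, List.length_range]
  apply List.map_congr_left
  intro n hn
  have hnK : n < K := List.mem_range.mp hn
  simp only [Function.comp_apply]
  rw [vdPre_getD _ [] n (by simpa using Nat.le_of_lt hnK),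
      vdSuf_getD _ _ (n + 1) (by simpa using hnK)]
  have hK : ((K : Int) * (P : Int)) = ((K * P : Nat) : Int) := by push_cast; ring
  have hA2 : ((n : Int) * (P : Int) + (P : Int)) = (((n + 1) * P : Nat) : Int) := by push_cast; ring
  have hA1 : ((n : Int) * (P : Int)) = ((n * P : Nat) : Int) := by push_cast; ring
  rw [hA2, hA1, hK, PySem.List.slice_to_natCast, PySem.List.slice_from_natCast,
      PySem.List.slice_from_natCast]
  rw [vd_chunks_prefix data P K n (Nat.le_of_lt hnK), List.nil_append,
      vd_chunks_suffix data P K (n + 1) hnK]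

-- valid chunks: A's slice [j : j+p] equals B's chunk [m*p : (m+1)*p].
theorem vd_valid_side (data : List String) (p k : Int) :
    ((PySem.List.pyRange 0 k 1).map
        (fun i => PySem.List.slice data (some (i * p)) (some (i * p + p))))
    = vdChunks data p k := by
  unfold vdChunks
  apply List.map_congr_left
  intro i _
  have : i * p + p = (i + 1) * p := by ring
  rw [this]

-- ===== VERDICT (by name: the statement is the Claim_ definition above) =====
theorem validation_data_spec : Claim_equal_validation_data := by
  intro tf td k _hdom hk
  unfold Spec_validation_data validation_data validation_data_alt
  simp only []
  rw [vd_foldl_four]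
  simp only [List.nil_append]
  rcases lt_or_gt_of_ne hk with hneg | hpos
  · -- k < 0: every range is empty on both sides
    rw [PySem.List.pyRange_one_eq_nil (by omega)]
    unfold vdChunks vdTrains
    rw [PySem.List.pyRange_one_eq_nil (by omega)]
    simp
  · -- k > 0
    set p : Int := PySem.Int.floordiv (td.length : Int) k with hp
    have hp0 : 0 ≤ p := by
      rw [hp, PySem.Int.floordiv_eq_ediv_of_pos hpos]
      exact Int.ediv_nonneg (by positivity) (le_of_lt hpos)
    obtain ⟨P, hP⟩ := Int.eq_ofNat_of_zero_le hp0
    obtain ⟨K, hK⟩ := Int.eq_ofNat_of_zero_le (le_of_lt hpos)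
    rw [hP, hK]
    rw [vd_valid_side tf, vd_valid_side td, vd_side tf P K, vd_side td P K]
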